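-- pv_equiv track=rewrite | github.com/thisIsJooS/Problem-Solving-Hub | book--co-te-hap-doe/16-85.py | _solution
-- ===== SOURCE A (Python) =====
-- def _solution(n, stations, w):
--     answer = 0
--
--     location = 1
--     idx = 0
--
--     while location <= n:
--         if idx < len(stations) and location >= stations[idx] - w:
--             location = stations[idx] + w + 1
--             idx += 1
--         else:
--             location += 2 * w + 1
--             answer += 1
--
--     return answer
-- ===== SOURCE B (Python) =====
-- def _solution(n, stations, w):
--     # Counts access points arithmetically: one ceiling division per gap between
--     # stations instead of stepping location one access point at a time.
--     s = 2 * w + 1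
--     answer = 0
--     location = 1
--     for st in stations:
--         if location > n:
--             return answer
--         target = st - w
--         if location < target:
--             k1 = -((location - target) // s)       # ceil((target - location) / s)
--             k2 = -((location - (n + 1)) // s)      # ceil((n + 1 - location) / s)
--             if k1 >= k2:
--                 return answer + k2
--             answer += k1
--         location = st + w + 1
--     if location <= n:
--         answer += -((location - (n + 1)) // s)
--     return answer
-- ===== Notes on version B (the rewrite author's own statement) =====
-- stated objective: alternative
-- what changed: B replaces A's access-point-by-access-point while-loop sweep (location += 2*w+1 once per placed access point) with a single pass over the stations list that computes the number of placements in each gap by one ceiling division.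
import Mathlib
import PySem

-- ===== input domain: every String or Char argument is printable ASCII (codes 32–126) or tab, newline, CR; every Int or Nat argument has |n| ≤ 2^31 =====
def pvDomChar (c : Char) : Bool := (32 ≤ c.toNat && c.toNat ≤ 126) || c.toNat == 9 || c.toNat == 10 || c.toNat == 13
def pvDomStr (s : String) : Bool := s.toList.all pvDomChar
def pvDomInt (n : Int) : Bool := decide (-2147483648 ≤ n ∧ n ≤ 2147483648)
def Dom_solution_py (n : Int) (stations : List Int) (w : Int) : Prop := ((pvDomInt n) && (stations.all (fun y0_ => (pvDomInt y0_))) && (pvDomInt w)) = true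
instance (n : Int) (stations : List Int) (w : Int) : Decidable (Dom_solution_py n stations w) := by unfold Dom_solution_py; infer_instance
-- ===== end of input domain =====

-- B replaces A's one-access-point-at-a-time sweep by one ceiling division per
-- gap between stations (a single pass over the stations list).

-- ===== PORT A =====
-- A's while loop, transliterated; the fuel only makes the recursion total
-- (it exceeds the number of iterations on every input admitted by Pre_).
def pvALoop (n w : Int) (stations : List Int) : Nat → Int → Nat → Int → Int
  | 0, _, _, answer => answer
  | fuel + 1, location, idx, answer =>
    if location ≤ n then
      if idx < stations.length ∧ stations.getD idx 0 - w ≤ location then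
        pvALoop n w stations fuel (stations.getD idx 0 + w + 1) (idx + 1) answer
      else
        pvALoop n w stations fuel (location + (2 * w + 1)) idx (answer + 1)
    else answer

def solution_py (n : Int) (stations : List Int) (w : Int) : Int :=
  pvALoop n w stations
    ((stations.length + 1) *
      (((n + 1) - stations.foldr (fun st m => min (st + w + 1) m) 1).toNat + 1))
    1 0 0

-- ===== PORT B =====
-- Source B's loop over the stations list, with the two ceiling divisions
-- -((x) // s) written with PySem.Int.floordiv (Python's floor //).
def pvBLoop (n w s : Int) : List Int → Int → Int → Int
  | [], location, answer =>
    if location ≤ n then answer + (-(PySem.Int.floordiv (location - (n + 1)) s))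
    else answer
  | st :: rest, location, answer =>
    if n < location then answer
    else
      if location < st - w then
        let k1 := -(PySem.Int.floordiv (location - (st - w)) s)
        let k2 := -(PySem.Int.floordiv (location - (n + 1)) s)
        if k2 ≤ k1 then answer + k2
        else pvBLoop n w s rest (st + w + 1) (answer + k1)
      else pvBLoop n w s rest (st + w + 1) answer

def solution_py_alt (n : Int) (stations : List Int) (w : Int) : Int :=
  pvBLoop n w (2 * w + 1) stations 1 0

-- ===== PRECONDITION & SPEC =====
-- Pre_ excludes exactly n ≥ 1 ∧ w < 0, where Python A's while loop never
-- terminates (the step 2*w+1 ≤ 0 cannot move location past n); A returns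
-- on no input of that region.
def Pre_solution_py (n : Int) (stations : List Int) (w : Int) : Prop :=
  n < 1 ∨ 0 ≤ w
instance (n : Int) (stations : List Int) (w : Int) : Decidable (Pre_solution_py n stations w) := by unfold Pre_solution_py; infer_instance

def pvWitness_solution_py : Int × List Int × Int := (10, [3, 8], 1)

def Spec_solution_py (n : Int) (stations : List Int) (w : Int) (out : Int) : Prop := out = solution_py_alt n stations w
instance (n : Int) (stations : List Int) (w : Int) (out : Int) : Decidable (Spec_solution_py n stations w out) := by unfold Spec_solution_py; infer_instance

-- ===== CLAIM (what is proved, stated in full; the proofs are below) =====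
def Claim_equal_solution_py : Prop := ∀ (n : Int) (stations : List Int) (w : Int), Dom_solution_py n stations w → Pre_solution_py n stations w → Spec_solution_py n stations w (solution_py n stations w)

-- ===== LEMMAS AND PROOFS =====

-- ceiling-division facts about -((-a) // s), via PySem.Int.neg_floordiv_neg_eq_iff_of_pos
theorem pv_ceil_bracket (s a : Int) (hs : 0 < s) :
    (-(PySem.Int.floordiv (-a) s) - 1) * s < a ∧ a ≤ (-(PySem.Int.floordiv (-a) s)) * s :=
  (PySem.Int.neg_floordiv_neg_eq_iff_of_pos hs).mp rfl

theorem pv_ceil_one (s a : Int) (hs : 0 < s) (h1 : 0 < a) (h2 : a ≤ s) :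
    -(PySem.Int.floordiv (-a) s) = 1 := by
  rw [PySem.Int.neg_floordiv_neg_eq_iff_of_pos hs]
  constructor <;> simpa

theorem pv_ceil_pos (s a : Int) (hs : 0 < s) (h1 : 0 < a) :
    1 ≤ -(PySem.Int.floordiv (-a) s) := by
  by_cases h1 : 1 ≤ -(PySem.Int.floordiv (-a) s)
  · exact h1
  · exfalso; nlinarith [pv_ceil_bracket s a hs, lt_of_not_ge h1]

theorem pv_ceil_succ (s a : Int) (hs : 0 < s) :
    -(PySem.Int.floordiv (-a) s) = 1 + -(PySem.Int.floordiv (-(a - s)) s) := by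
  obtain ⟨h, h'⟩ := pv_ceil_bracket s (a - s) hs
  rw [PySem.Int.neg_floordiv_neg_eq_iff_of_pos hs]
  constructor <;> nlinarith

-- rewrite the port's literal numerators into the -(−a)-shape of the facts above
theorem pv_neg_shape (x y : Int) (s : Int) :
    -(PySem.Int.floordiv (x - y) s) = -(PySem.Int.floordiv (-(y - x)) s) := by
  ring_nf

-- the minimum that lower-bounds every value location takes
theorem pv_minval_le_init (w : Int) (l : List Int) :
    l.foldr (fun st m => min (st + w + 1) m) 1 ≤ 1 := by
  induction l with
  | nil => simp
  | cons st rest ih => simpa using Or.inr ih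

theorem pv_minval_le_mem (w : Int) (l : List Int) {st : Int} (h : st ∈ l) :
    l.foldr (fun st m => min (st + w + 1) m) 1 ≤ st + w + 1 := by
  induction l with
  | nil => cases h
  | cons a rest ih =>
    rcases List.mem_cons.mp h with h | h
    · subst h; simp
    · simpa using Or.inr (ih h)

-- one else-iteration of A is absorbed by B's ceiling divisions: empty tail
theorem pvBLoop_nil_step (n w location answer : Int) (hw : 0 ≤ w)
    (hln : location ≤ n) :
    pvBLoop n w (2 * w + 1) [] location answer =
      pvBLoop n w (2 * w + 1) [] (location + (2 * w + 1)) (answer + 1) := by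
  have hs : (0 : Int) < 2 * w + 1 := by omega
  simp only [pvBLoop, if_pos hln]
  by_cases h : location + (2 * w + 1) ≤ n
  · rw [if_pos h, pv_neg_shape location (n+1), pv_neg_shape (location + (2*w+1)) (n+1),
      pv_ceil_succ (2*w+1) (n + 1 - location) hs]
    have : n + 1 - location - (2*w+1) = n + 1 - (location + (2*w+1)) := by ring
    rw [this]; ring
  · rw [if_neg h, pv_neg_shape location (n+1),
      pv_ceil_one (2*w+1) (n + 1 - location) hs (by omega) (by omega)]

-- one else-iteration of A absorbed by B: station tail, location still left of it
theorem pvBLoop_cons_step (n w st : Int) (rest : List Int) (location answer : Int)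
    (hw : 0 ≤ w) (hln : location ≤ n) (hlt : location < st - w) :
    pvBLoop n w (2 * w + 1) (st :: rest) location answer =
      pvBLoop n w (2 * w + 1) (st :: rest) (location + (2 * w + 1)) (answer + 1) := by
  have hs : (0 : Int) < 2 * w + 1 := by omega
  have hk2 : -(PySem.Int.floordiv (location - (n + 1)) (2*w+1)) =
      1 + -(PySem.Int.floordiv ((location + (2*w+1)) - (n + 1)) (2*w+1)) := by
    rw [pv_neg_shape location (n+1), pv_neg_shape (location + (2*w+1)) (n+1),
      pv_ceil_succ (2*w+1) (n + 1 - location) hs]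
    have : n + 1 - location - (2*w+1) = n + 1 - (location + (2*w+1)) := by ring
    rw [this]
  simp only [pvBLoop, if_neg (by omega : ¬ n < location), if_pos hlt]
  by_cases h : n < location + (2 * w + 1)
  · -- the step leaves [1, n]: B's k2 is 1 and k1 ≥ 1, so both sides are answer + 1
    rw [if_pos h]
    have h1 : -(PySem.Int.floordiv (location - (n + 1)) (2*w+1)) = 1 := by
      rw [pv_neg_shape location (n+1)]
      exact pv_ceil_one (2*w+1) (n + 1 - location) hs (by omega) (by omega)
    have h2 : 1 ≤ -(PySem.Int.floordiv (location - (st - w)) (2*w+1)) := by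
      rw [pv_neg_shape location (st - w)]
      exact pv_ceil_pos (2*w+1) (st - w - location) hs (by omega)
    rw [if_pos (by omega), h1]
  · rw [if_neg h]
    by_cases h' : location + (2 * w + 1) < st - w
    · -- both k1 and k2 drop by exactly one
      rw [if_pos h']
      have hk1 : -(PySem.Int.floordiv (location - (st - w)) (2*w+1)) =
          1 + -(PySem.Int.floordiv ((location + (2*w+1)) - (st - w)) (2*w+1)) := by
        rw [pv_neg_shape location (st - w), pv_neg_shape (location + (2*w+1)) (st - w),
          pv_ceil_succ (2*w+1) (st - w - location) hs]
        have : st - w - location - (2*w+1) = st - w - (location + (2*w+1)) := by ring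
        rw [this]
      by_cases hb : -(PySem.Int.floordiv ((location + (2*w+1)) - (n + 1)) (2*w+1)) ≤
          -(PySem.Int.floordiv ((location + (2*w+1)) - (st - w)) (2*w+1))
      · rw [if_pos hb, if_pos (by omega), hk2]; ring
      · rw [if_neg hb, if_neg (by omega), hk1]; ring_nf
    · -- the step reaches the station: k1 = 1 < k2, both sides jump with answer + 1
      rw [if_neg h']
      have hk1 : -(PySem.Int.floordiv (location - (st - w)) (2*w+1)) = 1 := by
        rw [pv_neg_shape location (st - w)]
        exact pv_ceil_one (2*w+1) (st - w - location) hs (by omega) (by omega)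
      have hk2' : 1 ≤ -(PySem.Int.floordiv ((location + (2*w+1)) - (n + 1)) (2*w+1)) := by
        rw [pv_neg_shape (location + (2*w+1)) (n+1)]
        exact pv_ceil_pos (2*w+1) (n + 1 - (location + (2*w+1))) hs (by omega)
      rw [if_neg (by omega), hk1]

-- main invariant: with enough fuel, A's loop from (location, idx) equals B's
-- loop on the remaining stations, provided w ≥ 0
theorem pvALoop_eq_pvBLoop (n w : Int) (stations : List Int) (hw : 0 ≤ w) :
    ∀ (fuel : Nat) (location : Int) (idx : Nat) (answer : Int),
      idx ≤ stations.length →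
      stations.foldr (fun st m => min (st + w + 1) m) 1 ≤ location →
      (stations.length - idx) * (((n + 1) - stations.foldr (fun st m => min (st + w + 1) m) 1).toNat + 1)
        + ((n + 1) - location).toNat < fuel →
      pvALoop n w stations fuel location idx answer =
        pvBLoop n w (2 * w + 1) (stations.drop idx) location answer := by
  intro fuel
  induction fuel with
  | zero => intro location idx answer _ _ hfu; omega
  | succ fuel ih =>
    intro location idx answer hidx hm hfu
    set m := stations.foldr (fun st m => min (st + w + 1) m) 1 with hmdef
    set C : Nat := ((n + 1) - m).toNat + 1 with hC
    by_cases hln : location ≤ n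
    · rw [pvALoop, if_pos hln]
      by_cases hcond : idx < stations.length ∧ stations.getD idx 0 - w ≤ location
      · obtain ⟨hlt, hge⟩ := hcond
        rw [if_pos ⟨hlt, hge⟩]
        have hget : stations.getD idx 0 = stations[idx] := List.getD_eq_getElem stations 0 hlt
        have hdrop : stations.drop idx = stations[idx] :: stations.drop (idx + 1) :=
          List.drop_eq_getElem_cons hlt
        have hmem : stations[idx] ∈ stations := List.getElem_mem hlt
        have hmle : m ≤ stations[idx] + w + 1 := pv_minval_le_mem w stations hmem
        have hsplit : (stations.length - idx) * C = (stations.length - idx - 1) * C + C := by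
          have h1 : stations.length - idx = (stations.length - idx - 1) + 1 := by omega
          conv_lhs => rw [h1]
          rw [Nat.succ_mul]
        have htle : ((n + 1) - (stations[idx] + w + 1)).toNat ≤ C - 1 := by
          have := Int.toNat_le_toNat (show (n+1) - (stations[idx] + w + 1) ≤ (n+1) - m by omega)
          omega
        have hfu' : (stations.length - (idx + 1)) * C
            + ((n + 1) - (stations[idx] + w + 1)).toNat < fuel := by
          have h2 : stations.length - (idx + 1) = stations.length - idx - 1 := by omega
          rw [h2]; omega
        rw [hget, ih (stations[idx] + w + 1) (idx + 1) answer (by omega) (by omega) hfu',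
          hdrop, pvBLoop, if_neg (by omega), if_neg (by omega)]
      · rw [if_neg hcond]
        have hstep : pvBLoop n w (2 * w + 1) (stations.drop idx) location answer =
            pvBLoop n w (2 * w + 1) (stations.drop idx) (location + (2 * w + 1)) (answer + 1) := by
          by_cases hil : idx < stations.length
          · have hge : location < stations.getD idx 0 - w := by
              rcases not_and_or.mp hcond with h | h
              · omega
              · omega
            have hget : stations.getD idx 0 = stations[idx] := List.getD_eq_getElem stations 0 hil
            rw [List.drop_eq_getElem_cons hil]
            exact pvBLoop_cons_step n w stations[idx] (stations.drop (idx+1)) location answer hw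
              hln (by omega)
          · have : stations.drop idx = [] := List.drop_eq_nil_of_le (by omega)
            rw [this]
            exact pvBLoop_nil_step n w location answer hw hln
        rw [hstep]
        exact ih (location + (2 * w + 1)) idx (answer + 1) hidx (by omega) (by omega)
    · rw [pvALoop, if_neg hln]
      cases hd : stations.drop idx with
      | nil => rw [pvBLoop, if_neg hln]
      | cons st rest => rw [pvBLoop, if_pos (by omega)]

-- ===== VERDICT (by name: the statement is the Claim_ definition above) =====
theorem solution_py_spec : Claim_equal_solution_py := by
  intro n stations w _ hpre
  unfold Spec_solution_py solution_py solution_py_alt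
  rcases (show 0 ≤ w ∨ n < 1 from hpre.symm.imp id id) with hw | hn
  · have hm1 : stations.foldr (fun st m => min (st + w + 1) m) 1 ≤ 1 :=
      pv_minval_le_init w stations
    apply pvALoop_eq_pvBLoop n w stations hw _ 1 0 0 (by omega) hm1
    have htn := Int.toNat_le_toNat (show (n + 1) - 1 ≤
      (n + 1) - stations.foldr (fun st m => min (st + w + 1) m) 1 by omega)
    rw [Nat.sub_zero, Nat.succ_mul]
    omega
  · -- n < 1: the loop body never runs on either side
    have hfu : 0 < (stations.length + 1) *
        (((n + 1) - stations.foldr (fun st m => min (st + w + 1) m) 1).toNat + 1) := by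
      positivity
    cases hk : (stations.length + 1) *
        (((n + 1) - stations.foldr (fun st m => min (st + w + 1) m) 1).toNat + 1) with
    | zero => omega
    | succ k =>
    rw [pvALoop, if_neg (by omega)]
    cases stations with
    | nil => rw [pvBLoop, if_neg (by omega)]
    | cons st rest => rw [pvBLoop, if_pos (by omega)]
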